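-- pv_equiv track=rewrite | github.com/christian-clark/cgInduction | preprocess.py | break_sentence_with_eos
-- ===== SOURCE A (Python) =====
-- EOS = '<eos>'
--
-- def break_sentence_with_eos(sentence):
--     """
--      break sentences with EOS signs to replace break_sentence where it is broken like
--      LM
--     """
--     ret = []
--     cur = 0
--     start_index = 0
--     for index, token in enumerate(sentence):
--         if token == EOS:
--             end_index = index + 1
--             ret.append(sentence[start_index:end_index])
--             start_index = end_index
--     return ret
-- ===== SOURCE B (Python) =====
-- EOS = '<eos>'
--
-- def break_sentence_with_eos(sentence):
--     ret = []
--     cur = []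
--     for token in sentence:
--         cur.append(token)
--         if token == EOS:
--             ret.append(cur)
--             cur = []
--     return ret
-- ===== Notes on version B (the rewrite author's own statement) =====
-- stated objective: simpler
-- what changed: Replaces index bookkeeping (start_index/end_index with slicing of the original list) by a single running buffer that is appended to and flushed at each EOS; no enumerate, no slicing, and the unused 'cur = 0' disappears.
import Mathlib
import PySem

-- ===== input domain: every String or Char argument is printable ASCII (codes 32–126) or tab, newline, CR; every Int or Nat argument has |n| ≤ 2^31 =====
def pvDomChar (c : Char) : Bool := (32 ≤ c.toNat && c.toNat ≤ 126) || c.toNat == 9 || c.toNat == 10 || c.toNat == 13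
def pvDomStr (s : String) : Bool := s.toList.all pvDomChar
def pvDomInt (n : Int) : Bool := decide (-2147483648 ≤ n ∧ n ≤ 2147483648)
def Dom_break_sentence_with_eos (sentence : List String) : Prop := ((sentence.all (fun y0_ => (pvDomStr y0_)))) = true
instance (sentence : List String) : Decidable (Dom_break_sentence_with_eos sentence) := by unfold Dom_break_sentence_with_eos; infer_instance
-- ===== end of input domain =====

-- B replaces A's index bookkeeping and slicing with a single running buffer flushed at each EOS (objective: simpler).

-- ===== PORT A =====
-- literal port of A: enumerate the sentence, remember start_index, slice at each EOS
def break_sentence_with_eos (sentence : List String) : List (List String) :=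
  ((PySem.List.enumerate sentence 0).foldl
    (fun (st : List (List String) × Int) (it : Int × String) =>
      if it.2 == "<eos>" then
        (st.1 ++ [PySem.List.slice sentence (some st.2) (some (it.1 + 1))], it.1 + 1)
      else st)
    ([], 0)).1

-- ===== PORT B =====
-- literal port of B: append each token to a running buffer, flush it at each EOS
def break_sentence_with_eos_alt (sentence : List String) : List (List String) :=
  (sentence.foldl
    (fun (st : List (List String) × List String) (tok : String) =>
      let cur := st.2 ++ [tok]
      if tok == "<eos>" then (st.1 ++ [cur], []) else (st.1, cur))
    ([], [])).1

-- ===== PRECONDITION & SPEC =====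
def Spec_break_sentence_with_eos (sentence : List String) (out : List (List String)) : Prop := out = break_sentence_with_eos_alt sentence
instance (sentence : List String) (out : List (List String)) : Decidable (Spec_break_sentence_with_eos sentence out) := by unfold Spec_break_sentence_with_eos; infer_instance

-- ===== CLAIM (what is proved, stated in full; the proofs are below) =====
def Claim_equal_break_sentence_with_eos : Prop := ∀ (sentence : List String), Dom_break_sentence_with_eos sentence → Spec_break_sentence_with_eos sentence (break_sentence_with_eos sentence)

-- ===== LEMMAS AND PROOFS =====

-- the buffer grows by exactly the next token
lemma buffer_step (pre l' : List String) (tok : String) (s : Nat) (hs : s ≤ pre.length) :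
    ((pre ++ tok :: l').drop s).take (pre.length + 1 - s)
      = ((pre ++ tok :: l').drop s).take (pre.length - s) ++ [tok] := by
  rw [List.drop_append_of_le_length hs]
  have hlen : (pre.drop s).length = pre.length - s := List.length_drop
  have h1 : pre.length + 1 - s = (pre.drop s).length + 1 := by omega
  have h2 : pre.length - s = (pre.drop s).length := by omega
  rw [h1, h2]
  rw [show (List.drop s pre).length + 1 = (List.drop s pre).length + 1 from rfl]
  rw [List.take_append, List.take_left']
  · simp
  · rfl

-- loop invariant: A's fold over the remaining tokens (ret, start) matches B's fold
-- with the buffer sentence[start:index]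
lemma inv (sentence : List String) : ∀ (l pre : List String) (ret : List (List String)) (s : Nat),
    sentence = pre ++ l → s ≤ pre.length →
    ((PySem.List.enumerate l (pre.length : Int)).foldl
      (fun (st : List (List String) × Int) (it : Int × String) =>
        if it.2 == "<eos>" then
          (st.1 ++ [PySem.List.slice sentence (some st.2) (some (it.1 + 1))], it.1 + 1)
        else st)
      (ret, (s : Int))).1
    = (l.foldl
        (fun (st : List (List String) × List String) (tok : String) =>
          let cur := st.2 ++ [tok]
          if tok == "<eos>" then (st.1 ++ [cur], []) else (st.1, cur))
        (ret, (sentence.drop s).take (pre.length - s))).1 := by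
  intro l
  induction l with
  | nil => intro pre ret s _ _; simp [PySem.List.enumerate_nil]
  | cons tok l' ih =>
    intro pre ret s hsent hs
    rw [PySem.List.enumerate_cons]
    simp only [List.foldl_cons]
    by_cases h : tok = "<eos>"
    · subst h
      simp only [beq_self_eq_true, if_pos]
      have hslice : PySem.List.slice sentence (some (s : Int)) (some ((pre.length : Int) + 1))
          = (sentence.drop s).take (pre.length - s) ++ [ "<eos>" ] := by
        have : ((pre.length : Int) + 1) = (((pre.length + 1 : Nat)) : Int) := by push_cast; ring
        rw [this, PySem.List.slice_natCast]
        exact hsent ▸ buffer_step pre l' "<eos>" s hs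
      rw [hslice]
      have hcast : (pre.length : Int) + 1 = (((pre.length + 1 : Nat)) : Int) := by push_cast; ring
      rw [hcast]
      have := ih (pre ++ ["<eos>"]) (ret ++ [(sentence.drop s).take (pre.length - s) ++ ["<eos>"]])
          (pre.length + 1) (by simpa using hsent) (by simp)
      simpa using this
    · have hbeq : (tok == "<eos>") = false := by simp [h]
      simp only [hbeq, if_neg, Bool.false_eq_true, not_false_eq_true]
      have hbuf : (sentence.drop s).take (pre.length + 1 - s)
          = (sentence.drop s).take (pre.length - s) ++ [tok] := hsent ▸ buffer_step pre l' tok s hs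
      have := ih (pre ++ [tok]) ret s (by simpa using hsent) (by simp; omega)
      simp only [List.length_append, List.length_cons, List.length_nil] at this
      rw [← hbuf]
      have hc : ((pre.length : Int) + 1) = (((pre.length + 1 : Nat)) : Int) := by push_cast; ring
      rw [hc]
      simpa using this

-- ===== VERDICT (by name: the statement is the Claim_ definition above) =====
theorem break_sentence_with_eos_spec : Claim_equal_break_sentence_with_eos := by
  intro sentence _
  unfold Spec_break_sentence_with_eos break_sentence_with_eos break_sentence_with_eos_alt
  have := inv sentence sentence [] [] 0 (by simp) (by simp)
  simpa using this
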